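-- pv_equiv track=rewrite | github.com/Abhi-Bagai/Advent-of-code-2025 | Day 10/Puzzle 2/day_ten_p_two.py | grid_red_green
-- ===== SOURCE A (Python) =====
-- def grid_red_green(green, red, size, minimum):
--     grid = []
--     for y in range(minimum, size):
--         row = []
--         for x in range(minimum, size):
--             point = '.'
--             if (x, y) in green:
--                 point = 'X'
--             elif (x, y) in red:
--                 point = '#'
--             row += point
--         grid.append(row)
--     return grid
-- ===== SOURCE B (Python) =====
-- def grid_red_green(green, red, size, minimum):
--     n = size - minimum
--     grid = [['.'] * n for _ in range(n)]
--     for pts, mark in ((red, '#'), (green, 'X')):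
--         for (x, y) in pts:
--             if minimum <= x < size and minimum <= y < size:
--                 grid[y - minimum][x - minimum] = mark
--     return grid
-- ===== Notes on version B (the rewrite author's own statement) =====
-- stated objective: alternative
-- what changed: Instead of testing every grid cell for membership in green/red (a linear scan per cell), B fills a blank grid once and scatter-writes '#' at each in-bounds red coordinate and then 'X' at each green one (green written last to honor A's elif priority).
import Mathlib
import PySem

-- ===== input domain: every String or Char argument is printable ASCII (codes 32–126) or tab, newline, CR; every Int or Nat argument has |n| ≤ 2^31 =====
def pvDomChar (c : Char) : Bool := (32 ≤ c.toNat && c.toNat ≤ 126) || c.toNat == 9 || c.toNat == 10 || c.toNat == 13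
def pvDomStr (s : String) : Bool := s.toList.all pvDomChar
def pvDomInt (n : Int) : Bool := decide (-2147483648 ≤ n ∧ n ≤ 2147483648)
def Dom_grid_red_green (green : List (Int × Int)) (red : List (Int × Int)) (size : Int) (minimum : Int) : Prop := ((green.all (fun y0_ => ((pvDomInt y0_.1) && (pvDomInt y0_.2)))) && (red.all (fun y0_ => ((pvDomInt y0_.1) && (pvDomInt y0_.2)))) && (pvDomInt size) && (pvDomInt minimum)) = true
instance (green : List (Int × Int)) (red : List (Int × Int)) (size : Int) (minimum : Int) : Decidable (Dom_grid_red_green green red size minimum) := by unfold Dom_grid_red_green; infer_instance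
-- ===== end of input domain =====

-- B fills a blank grid once and scatter-writes '#' at in-bounds red coordinates,
-- then 'X' at in-bounds green ones (green last = A's elif priority), replacing
-- A's per-cell membership scans.

-- ===== PORT A =====
-- per-cell membership test, row/grid built by append, as in A
def grid_red_green (green : List (Int × Int)) (red : List (Int × Int)) (size : Int) (minimum : Int) : List (List String) :=
  (PySem.List.pyRange minimum size 1).foldl (fun grid y =>
    grid ++ [(PySem.List.pyRange minimum size 1).foldl (fun row x =>
      row ++ [if (x, y) ∈ green then "X" else if (x, y) ∈ red then "#" else "."]) []]) []

-- ===== PORT B =====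
-- scatter-write of one mark over a list of points, bounds-checked as in Source B
def pvScatter (size minimum : Int) (mark : String) (pts : List (Int × Int)) (grid : List (List String)) : List (List String) :=
  pts.foldl (fun g p =>
    if minimum ≤ p.1 ∧ p.1 < size ∧ minimum ≤ p.2 ∧ p.2 < size then
      g.modify (p.2 - minimum).toNat (fun row => row.set (p.1 - minimum).toNat mark)
    else g) grid

def grid_red_green_alt (green : List (Int × Int)) (red : List (Int × Int)) (size : Int) (minimum : Int) : List (List String) :=
  pvScatter size minimum "X" green
    (pvScatter size minimum "#" red
      (List.replicate (size - minimum).toNat (List.replicate (size - minimum).toNat ".")))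

-- ===== PRECONDITION & SPEC =====
def Spec_grid_red_green (green : List (Int × Int)) (red : List (Int × Int)) (size : Int) (minimum : Int) (out : List (List String)) : Prop := out = grid_red_green_alt green red size minimum
instance (green : List (Int × Int)) (red : List (Int × Int)) (size : Int) (minimum : Int) (out : List (List String)) : Decidable (Spec_grid_red_green green red size minimum out) := by unfold Spec_grid_red_green; infer_instance

-- ===== CLAIM (what is proved, stated in full; the proofs are below) =====
def Claim_equal_grid_red_green : Prop := ∀ (green : List (Int × Int)) (red : List (Int × Int)) (size : Int) (minimum : Int), Dom_grid_red_green green red size minimum → Spec_grid_red_green green red size minimum (grid_red_green green red size minimum)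

-- ===== LEMMAS AND PROOFS =====

-- canonical form of an n×n grid given by a per-cell function
def pvMapGrid (n : Nat) (f : Nat → Nat → String) : List (List String) :=
  (List.range n).map (fun y => (List.range n).map (fun x => f x y))

theorem pvMapGrid_congr (n : Nat) (f g : Nat → Nat → String)
    (h : ∀ x y, x < n → y < n → f x y = g x y) : pvMapGrid n f = pvMapGrid n g := by
  unfold pvMapGrid
  refine List.map_congr_left ?_
  intro y hy
  refine List.map_congr_left ?_
  intro x hx
  exact h x y (List.mem_range.mp hx) (List.mem_range.mp hy)

theorem pvFoldl_push {α β : Type} (h : α → β) (l : List α) (init : List β) :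
    l.foldl (fun acc t => acc ++ [h t]) init = init ++ l.map h := by
  induction l generalizing init with
  | nil => simp
  | cons a l ih => simp [ih]

-- A computes the canonical grid of its per-cell test
theorem pvA_eq (green red : List (Int × Int)) (size minimum : Int) :
    grid_red_green green red size minimum =
      pvMapGrid (size - minimum).toNat (fun x y =>
        if (minimum + (x : Int), minimum + (y : Int)) ∈ green then "X"
        else if (minimum + (x : Int), minimum + (y : Int)) ∈ red then "#" else ".") := by
  unfold grid_red_green pvMapGrid
  rw [PySem.List.pyRange_one]
  simp only [pvFoldl_push, List.nil_append, List.map_map]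
  rfl

-- one bounds-checked write on a canonical grid overrides one cell
theorem pvModify_mapGrid (n : Nat) (f : Nat → Nat → String) (xi yi : Nat) (v : String)
    (hx : xi < n) (hy : yi < n) :
    (pvMapGrid n f).modify yi (fun row => row.set xi v) =
      pvMapGrid n (fun x y => if x = xi ∧ y = yi then v else f x y) := by
  unfold pvMapGrid
  apply List.ext_getElem
  · simp
  · intro i h1 h2
    rw [List.getElem_modify]
    simp only [List.length_map, List.length_range] at h2
    simp only [List.getElem_map, List.getElem_range]
    by_cases hiy : yi = i
    · subst hiy
      rw [if_pos rfl]
      apply List.ext_getElem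
      · simp
      · intro j h3 h4
        rw [List.getElem_set]
        simp only [List.length_map, List.length_range] at h4
        simp only [List.getElem_map, List.getElem_range]
        by_cases hjx : xi = j
        · subst hjx; simp
        · rw [if_neg hjx]
          simp [Ne.symm hjx]
    · rw [if_neg hiy]
      refine List.map_congr_left ?_
      intro x hxm
      have hne : ¬(x = xi ∧ i = yi) := fun h => hiy h.2.symm
      simp [hne]

-- scattering a constant mark over pts overrides exactly the in-range cells hit
theorem pvScatter_mapGrid (size minimum : Int) (v : String) (pts : List (Int × Int))
    (f : Nat → Nat → String) :
    pvScatter size minimum v pts (pvMapGrid (size - minimum).toNat f) =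
      pvMapGrid (size - minimum).toNat (fun x y =>
        if (minimum + (x : Int), minimum + (y : Int)) ∈ pts then v else f x y) := by
  induction pts generalizing f with
  | nil => simp [pvScatter]
  | cons p rest ih =>
    have hstep : ∀ g : List (List String),
        pvScatter size minimum v (p :: rest) g =
        pvScatter size minimum v rest
          (if minimum ≤ p.1 ∧ p.1 < size ∧ minimum ≤ p.2 ∧ p.2 < size then
            g.modify (p.2 - minimum).toNat (fun row => row.set (p.1 - minimum).toNat v)
          else g) := by
      intro g; rfl
    rw [hstep]
    by_cases hb : minimum ≤ p.1 ∧ p.1 < size ∧ minimum ≤ p.2 ∧ p.2 < size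
    · rw [if_pos hb]
      obtain ⟨h1, h2, h3, h4⟩ := hb
      have hxlt : (p.1 - minimum).toNat < (size - minimum).toNat := by omega
      have hylt : (p.2 - minimum).toNat < (size - minimum).toNat := by omega
      rw [pvModify_mapGrid _ _ _ _ _ hxlt hylt, ih]
      apply pvMapGrid_congr
      intro x y hx hy
      by_cases hr : (minimum + (x : Int), minimum + (y : Int)) ∈ rest
      · simp [hr]
      · by_cases hp : (minimum + (x : Int), minimum + (y : Int)) = p
        · have hxe : x = (p.1 - minimum).toNat := by
            have : p.1 = minimum + (x : Int) := by rw [← hp]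
            omega
          have hye : y = (p.2 - minimum).toNat := by
            have : p.2 = minimum + (y : Int) := by rw [← hp]
            omega
          rw [if_neg hr, if_pos ⟨hxe, hye⟩, if_pos (List.mem_cons.mpr (Or.inl hp))]
        · have hne : ¬(x = (p.1 - minimum).toNat ∧ y = (p.2 - minimum).toNat) := by
            rintro ⟨hxe, hye⟩
            apply hp
            have e1 : p.1 = minimum + (x : Int) := by omega
            have e2 : p.2 = minimum + (y : Int) := by omega
            exact Prod.ext e1.symm e2.symm
          simp [List.mem_cons, hp, hr, hne]
    · rw [if_neg hb, ih]
      apply pvMapGrid_congr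
      intro x y hx hy
      have hp : (minimum + (x : Int), minimum + (y : Int)) ≠ p := by
        intro he
        apply hb
        have e1 : p.1 = minimum + (x : Int) := by rw [← he]
        have e2 : p.2 = minimum + (y : Int) := by rw [← he]
        refine ⟨by omega, by omega, by omega, by omega⟩
      simp [List.mem_cons, hp]

theorem pvBlank (n : Nat) :
    List.replicate n (List.replicate n ".") = pvMapGrid n (fun _ _ => ("." : String)) := by
  unfold pvMapGrid
  simp [List.map_const']

-- ===== VERDICT (by name: the statement is the Claim_ definition above) =====
theorem grid_red_green_spec : Claim_equal_grid_red_green := by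
  intro green red size minimum _
  unfold Spec_grid_red_green grid_red_green_alt
  rw [pvA_eq, pvBlank, pvScatter_mapGrid, pvScatter_mapGrid]
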